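-- pv_equiv track=rewrite | github.com/seroak/algorithm | python알고리즘/프로그래머스 선입 선출 스케줄링/main.py | solution
-- ===== SOURCE A (Python) =====
-- def solution(n, cores):
--     answer = 0
--     # 코어의 길이보다 작거나 같으면 바로 n을 리턴
--     if n <= len(cores):
--         return n
--     else:
--         n -= len(cores)
--         left = 1
--         # 가장 오래 걸리는 코어의 시간 * n
--         # cores에 core가 하나이고 1이라면 지금 나오는 right가 정답인 상황이다 즉 최대값
--         right = max(cores) * n
--
--         while left < right:
--             # mid는 이 시간까지 했을 때 할당량 보다 적은데 가장 큰 경우를 찾는다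
--             mid = (left + right) // 2
--             capacity = 0
--             for c in cores:
--                 # 각각의 코어의 약수를 capacity에 더한다
--                 capacity += mid // c
--             if capacity >= n:
--                 right = mid
--             else:
--                 left = mid + 1
--
--         for c in cores:
--             n -= (right-1) // c
--         for i in range(len(cores)):
--             if right % cores[i] == 0:
--                 n -= 1
--             if n == 0:
--                 answer = (i+1)
--                 break
--
--
--
--     return answer
-- ===== SOURCE B (Python) =====
-- def solution(n, cores):
--     k = len(cores)
--     if n <= k:
--         return n
--     n -= k
--     SCALE = 1 << 64
--     s = sum(SCALE // c for c in cores)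
--     # capF(t) = sum(t//c) satisfies t*s/SCALE - k <= capF(t) <= t*(s+k)/SCALE for t >= 0,
--     # so capF(lo) < n and capF(hi) >= n: the n-th completion instant lies in (lo, hi]
--     lo = (n * SCALE - 1) // (s + k)
--     hi = ((n + k) * SCALE + s - 1) // s
--     n -= sum(lo // c for c in cores)
--     events = sorted((c * j, i)
--                     for i, c in enumerate(cores)
--                     for j in range(lo // c + 1, hi // c + 1))
--     return events[n - 1][1] + 1
-- ===== Notes on version B (the rewrite author's own statement) =====
-- stated objective: alternative
-- what changed: Replaces A's binary search over completion times (capacity loop plus a final modulo scan) by a closed-form window: 2^64-scaled reciprocal sums bound the n-th completion instant inside (lo, hi], and B enumerates the O(k) completion events (time, core index) in that window and sorts them, reading the answer off the r-th event.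
-- outside the precondition, e.g. on solution(5, [1, -3]): A returns 2, B returns 1; on solution(3, [-1]): A returns 0, B raises IndexError; on solution(2, [0]): A raises ZeroDivisionError, B raises ZeroDivisionError
import Mathlib
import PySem

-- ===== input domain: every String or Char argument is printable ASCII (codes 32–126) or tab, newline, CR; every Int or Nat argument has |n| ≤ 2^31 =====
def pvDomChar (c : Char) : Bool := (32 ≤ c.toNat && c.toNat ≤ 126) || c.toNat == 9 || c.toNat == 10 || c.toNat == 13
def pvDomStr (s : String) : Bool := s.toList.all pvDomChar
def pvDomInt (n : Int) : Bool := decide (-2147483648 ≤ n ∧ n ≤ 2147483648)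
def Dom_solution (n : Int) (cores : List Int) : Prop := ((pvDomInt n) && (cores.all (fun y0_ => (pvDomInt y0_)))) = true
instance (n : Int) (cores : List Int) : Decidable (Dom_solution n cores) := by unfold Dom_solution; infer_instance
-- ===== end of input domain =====

-- B replaces A's binary search over completion times by a closed-form window (2^64-scaled
-- reciprocal sums bound the finishing instant) plus an enumerate-and-sort of the few completion
-- events inside that window: an alternative algorithm, no speed claim.

-- ===== PORT A =====
-- the 'while left < right' bisection loop of A
def bsLoop (cores : List Int) (m left right : Int) : Int :=
  if _h : left < right then
    let mid := PySem.Int.floordiv (left + right) 2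
    let capacity := cores.foldl (fun acc c => acc + PySem.Int.floordiv mid c) 0
    if capacity ≥ m then bsLoop cores m left mid
    else bsLoop cores m (mid + 1) right
  else right
termination_by (right - left).toNat
decreasing_by
  · have h2 := PySem.Int.floordiv_eq_ediv_of_pos (a := left + right) (b := 2) (by norm_num)
    simp only [h2]; omega
  · have h2 := PySem.Int.floordiv_eq_ediv_of_pos (a := left + right) (b := 2) (by norm_num)
    simp only [h2]; omega

-- A's final 'for i in range(len(cores))' scan (answer stays 0 if the loop falls through)
def scanA : List Int → Int → Int → Int → Int
  | [], _, _, _ => 0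
  | c :: rest, right, m, i =>
    let m' := if PySem.Int.mod right c = 0 then m - 1 else m
    if m' = 0 then i + 1 else scanA rest right m' (i + 1)

def solution (n : Int) (cores : List Int) : Int :=
  if n ≤ (cores.length : Int) then n
  else
    let m := n - (cores.length : Int)
    let mx := (PySem.List.max? cores (fun x => x)).getD 0  -- max(cores); raises on [] (excluded by Pre_)
    let right := bsLoop cores m 1 (mx * m)
    let m2 := cores.foldl (fun acc c => acc - PySem.Int.floordiv (right - 1) c) m
    scanA cores right m2 0

-- ===== PORT B =====
-- the completion events of Source B's comprehension: for i, c in enumerate(cores),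
-- times c*j for j in range(lo//c + 1, hi//c + 1)
def eventsB (cores : List Int) (lo hi : Int) : List (Int × Int) :=
  (PySem.List.enumerate cores).flatMap
    (fun p => (PySem.List.pyRange (PySem.Int.floordiv lo p.2 + 1) (PySem.Int.floordiv hi p.2 + 1) 1).map
      (fun j => (p.2 * j, p.1)))

def solution_alt (n : Int) (cores : List Int) : Int :=
  if n ≤ (cores.length : Int) then n
  else
    let k : Int := (cores.length : Int)
    let m := n - k
    let scale : Int := 2 ^ 64
    let s := (cores.map (fun c => PySem.Int.floordiv scale c)).sum
    let lo := PySem.Int.floordiv (m * scale - 1) (s + k)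
    let hi := PySem.Int.floordiv ((m + k) * scale + s - 1) s
    let m2 := m - (cores.map (fun c => PySem.Int.floordiv lo c)).sum
    -- Python's sorted compares the (time, index) tuples lexicographically; ported exactly as the
    -- scalar key time*k + index, since every event index satisfies 0 ≤ index < k = len(cores)
    let evs := PySem.List.sorted (eventsB cores lo hi) (fun p => p.1 * k + p.2) false
    match PySem.List.pyGet? evs (m2 - 1) with
    | some p => p.2 + 1
    | none => 0  -- events[m2-1] raises IndexError in Python; unreachable under Pre_

-- ===== PRECONDITION & SPEC =====
-- Natural domain: positive core processing times. When n > len(cores), A raises on empty cores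
-- (ValueError from max) and on a 0 core time (ZeroDivisionError); on negative core times A returns
-- values that are meaningless for scheduling (B returns other accidental values or raises there), so Pre_
-- restricts to cores all ≥ 1 whenever the nontrivial branch runs.
def Pre_solution (n : Int) (cores : List Int) : Prop :=
  n ≤ (cores.length : Int) ∨ (cores ≠ [] ∧ ∀ c ∈ cores, 1 ≤ c)
instance (n : Int) (cores : List Int) : Decidable (Pre_solution n cores) := by
  unfold Pre_solution; infer_instance
def pvWitness_solution : Int × List Int := (7, [1, 2, 3])

def Spec_solution (n : Int) (cores : List Int) (out : Int) : Prop := out = solution_alt n cores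
instance (n : Int) (cores : List Int) (out : Int) : Decidable (Spec_solution n cores out) := by
  unfold Spec_solution; infer_instance

-- ===== CLAIM (what is proved, stated in full; the proofs are below) =====
def Claim_equal_solution : Prop := ∀ (n : Int) (cores : List Int), Dom_solution n cores → Pre_solution n cores → Spec_solution n cores (solution n cores)

-- ===== LEMMAS AND PROOFS =====

-- total capacity Σ_c t // c : the quantity A bisects over and B brackets with scaled reciprocals
def capF (cores : List Int) (t : Int) : Int :=
  cores.foldl (fun acc c => acc + PySem.Int.floordiv t c) 0

-- number of cores finishing exactly at instant t
def divCnt (cores : List Int) (t : Int) : Int :=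
  ((cores.filter (fun c => PySem.Int.mod t c == 0)).length : Int)

theorem capF_cons (c : Int) (cs : List Int) (t : Int) :
    capF (c :: cs) t = PySem.Int.floordiv t c + capF cs t := by
  simp [capF, PySem.List.foldl_add]

theorem capF_eq_sum (cores : List Int) (t : Int) :
    capF cores t = (cores.map (fun c => PySem.Int.floordiv t c)).sum := by
  simp [capF, PySem.List.foldl_add]

theorem divCnt_cons (c : Int) (cs : List Int) (t : Int) :
    divCnt (c :: cs) t = (if PySem.Int.mod t c = 0 then 1 else 0) + divCnt cs t := by
  simp only [divCnt, List.filter_cons]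
  by_cases h : PySem.Int.mod t c = 0
  · simp only [h, beq_self_eq_true, if_true, List.length_cons]
    push_cast; omega
  · have hb : (PySem.Int.mod t c == 0) = false := by simp [h]
    simp [hb, h]

theorem fd_mul_le (a b : Int) (hb : 0 < b) : PySem.Int.floordiv a b * b ≤ a :=
  (PySem.Int.le_floordiv_iff_mul_le hb).mp (le_refl _)

theorem mod_bounds (a b : Int) (hb : 0 < b) : 0 ≤ PySem.Int.mod a b ∧ PySem.Int.mod a b < b := by
  rw [PySem.Int.mod_eq_emod_of_pos hb]
  exact ⟨Int.emod_nonneg a (by omega), Int.emod_lt_of_pos a hb⟩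

theorem floordiv_mono_num {s t c : Int} (hc : 1 ≤ c) (h : s ≤ t) :
    PySem.Int.floordiv s c ≤ PySem.Int.floordiv t c := by
  rw [PySem.Int.floordiv_eq_ediv_of_pos (by omega), PySem.Int.floordiv_eq_ediv_of_pos (by omega)]
  exact Int.ediv_le_ediv (by omega) h

theorem capF_mono (cores : List Int) (hc : ∀ c ∈ cores, 1 ≤ c) {s t : Int} (h : s ≤ t) :
    capF cores s ≤ capF cores t := by
  induction cores with
  | nil => simp [capF]
  | cons c cs ih =>
      rw [capF_cons, capF_cons]
      have h1 := floordiv_mono_num (hc c (by simp)) h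
      have h2 := ih (fun x hx => hc x (by simp [hx]))
      omega

theorem capF_nonpos (cores : List Int) (hc : ∀ c ∈ cores, 1 ≤ c) {t : Int} (h : t ≤ 0) :
    capF cores t ≤ 0 := by
  induction cores with
  | nil => simp [capF]
  | cons c cs ih =>
      rw [capF_cons]
      have hcpos : (0:Int) < c := by have := hc c (by simp); omega
      have h1 : PySem.Int.floordiv t c < 1 :=
        (PySem.Int.floordiv_lt_iff_lt_mul hcpos).mpr (by omega)
      have h2 := ih (fun x hx => hc x (by simp [hx]))
      omega

theorem capF_nonneg (cores : List Int) (hc : ∀ c ∈ cores, 1 ≤ c) {t : Int} (h : 0 ≤ t) :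
    0 ≤ capF cores t := by
  induction cores with
  | nil => simp [capF]
  | cons c cs ih =>
      rw [capF_cons]
      have hcpos : (0:Int) < c := by have := hc c (by simp); omega
      have h1 : (0:Int) ≤ PySem.Int.floordiv t c :=
        (PySem.Int.le_floordiv_iff_mul_le hcpos).mpr (by omega)
      have h2 := ih (fun x hx => hc x (by simp [hx]))
      omega

theorem foldl_sub_eq (cores : List Int) (t : Int) :
    ∀ a : Int, cores.foldl (fun acc c => acc - PySem.Int.floordiv t c) a = a - capF cores t := by
  induction cores with
  | nil => intro a; simp [capF]
  | cons c cs ih =>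
      intro a
      rw [capF_cons]
      simp only [List.foldl_cons]
      rw [ih]
      ring

theorem capF_start (cores : List Int) (hne : cores ≠ []) (hc : ∀ c ∈ cores, 1 ≤ c)
    {M m : Int} (hm : 1 ≤ m) (hM : ∀ c ∈ cores, c ≤ M) :
    m ≤ capF cores (M * m) := by
  obtain ⟨c, cs, rfl⟩ : ∃ c cs, cores = c :: cs := by
    cases cores with
    | nil => exact absurd rfl hne
    | cons c cs => exact ⟨c, cs, rfl⟩
  rw [capF_cons]
  have hc1 : (1:Int) ≤ c := hc c (by simp)
  have hcM : c ≤ M := hM c (by simp)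
  have hhead : m ≤ PySem.Int.floordiv (M * m) c := by
    rw [PySem.Int.le_floordiv_iff_mul_le (by omega)]
    nlinarith
  have htail : 0 ≤ capF cs (M * m) :=
    capF_nonneg cs (fun x hx => hc x (by simp [hx])) (by nlinarith)
  omega

theorem bsLoop_correct (cores : List Int) (hc : ∀ c ∈ cores, 1 ≤ c) (m : Int) :
    ∀ l r : Int, l ≤ r → m ≤ capF cores r → (∀ t, t < l → capF cores t < m) →
      l ≤ bsLoop cores m l r ∧ bsLoop cores m l r ≤ r ∧
      m ≤ capF cores (bsLoop cores m l r) ∧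
      ∀ t, t < bsLoop cores m l r → capF cores t < m := by
  have main : ∀ (k : Nat) (l r : Int), (r - l).toNat ≤ k → l ≤ r → m ≤ capF cores r →
      (∀ t, t < l → capF cores t < m) →
      l ≤ bsLoop cores m l r ∧ bsLoop cores m l r ≤ r ∧
      m ≤ capF cores (bsLoop cores m l r) ∧
      ∀ t, t < bsLoop cores m l r → capF cores t < m := by
    intro k
    induction k with
    | zero =>
        intro l r hk h1 h2 h3
        have hlr : l = r := by omega
        rw [bsLoop, dif_neg (by omega)]
        exact ⟨by omega, le_refl r, h2, fun t ht => h3 t (by omega)⟩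
    | succ k ih =>
        intro l r hk h1 h2 h3
        by_cases hlt : l < r
        · have hdiv := PySem.Int.floordiv_eq_ediv_of_pos (a := l + r) (b := 2) (by norm_num)
          have hmidl : l ≤ PySem.Int.floordiv (l + r) 2 := by rw [hdiv]; omega
          have hmidr : PySem.Int.floordiv (l + r) 2 < r := by rw [hdiv]; omega
          have hstep : bsLoop cores m l r =
              (if capF cores (PySem.Int.floordiv (l + r) 2) ≥ m then
                bsLoop cores m l (PySem.Int.floordiv (l + r) 2)
              else bsLoop cores m (PySem.Int.floordiv (l + r) 2 + 1) r) := by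
            rw [bsLoop, dif_pos hlt]
            rfl
          rw [hstep]
          by_cases hge : capF cores (PySem.Int.floordiv (l + r) 2) ≥ m
          · rw [if_pos hge]
            have := ih l (PySem.Int.floordiv (l + r) 2) (by omega) (by omega) hge h3
            exact ⟨this.1, by omega, this.2.2⟩
          · rw [if_neg hge]
            have h3' : ∀ t, t < PySem.Int.floordiv (l + r) 2 + 1 → capF cores t < m := by
              intro t ht
              calc capF cores t ≤ capF cores (PySem.Int.floordiv (l + r) 2) :=
                    capF_mono cores hc (by omega)
                _ < m := by omega
            have := ih (PySem.Int.floordiv (l + r) 2 + 1) r (by omega) (by omega) h2 h3'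
            exact ⟨by omega, this.2.1, this.2.2⟩
        · have hlr : l = r := by omega
          rw [bsLoop, dif_neg hlt]
          exact ⟨by omega, le_refl r, h2, fun t ht => h3 t (by omega)⟩
  intro l r h1 h2 h3
  exact main (r - l).toNat l r (le_refl _) h1 h2 h3

-- one core, one time step: t//c - (t-1)//c = [c divides t]
theorem fd_step {t c : Int} (hc : 1 ≤ c) :
    PySem.Int.floordiv t c =
      PySem.Int.floordiv (t - 1) c + (if PySem.Int.mod t c = 0 then 1 else 0) := by
  rw [PySem.Int.floordiv_eq_ediv_of_pos (by omega),
      PySem.Int.floordiv_eq_ediv_of_pos (by omega),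
      PySem.Int.mod_eq_emod_of_pos (by omega)]
  have h1 := Int.emod_add_mul_ediv t c
  have h2 := Int.emod_add_mul_ediv (t - 1) c
  have h3 : 0 ≤ t % c := Int.emod_nonneg t (by omega)
  have h4 : t % c < c := Int.emod_lt_of_pos t (by omega)
  have h5 : 0 ≤ (t - 1) % c := Int.emod_nonneg (t - 1) (by omega)
  have h6 : (t - 1) % c < c := Int.emod_lt_of_pos (t - 1) (by omega)
  split_ifs with h
  · -- c ∣ t : t - 1 = (c-1) + (t/c - 1)*c, so (t-1)/c = t/c - 1
    have e1 : t - 1 = (c - 1) + (t / c - 1) * c := by linarith [h1]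
    have e2 : (t - 1) / c = t / c - 1 := by
      rw [e1, Int.add_mul_ediv_right _ _ (show c ≠ 0 by omega),
          Int.ediv_eq_zero_of_lt (by omega) (by omega)]
      ring
    omega
  · -- c ∤ t : t - 1 = (t%c - 1) + (t/c)*c with 0 ≤ t%c - 1 < c, so quotients agree
    have e1 : t - 1 = (t % c - 1) + (t / c) * c := by linarith [h1]
    have e2 : (t - 1) / c = t / c := by
      rw [e1, Int.add_mul_ediv_right _ _ (show c ≠ 0 by omega),
          Int.ediv_eq_zero_of_lt (by omega) (by omega)]
      ring
    omega

theorem capF_step (cores : List Int) (hc : ∀ c ∈ cores, 1 ≤ c) (t : Int) :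
    capF cores t = capF cores (t - 1) + divCnt cores t := by
  induction cores with
  | nil => simp [capF, divCnt]
  | cons c cs ih =>
      rw [capF_cons, capF_cons, divCnt_cons]
      have h1 := fd_step (t := t) (hc c (by simp))
      have h2 := ih (fun x hx => hc x (by simp [hx]))
      omega

-- A's final scan: the returned index jj satisfies cores[jj] ∣ t and exactly m-1 earlier divisors
theorem scanA_char (t : Int) :
    ∀ (cs : List Int) (m i : Int), 1 ≤ m → m ≤ divCnt cs t →
      ∃ (jj : Nat) (hj : jj < cs.length),
        scanA cs t m i = i + (jj : Int) + 1 ∧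
        PySem.Int.mod t cs[jj] = 0 ∧
        divCnt (cs.take jj) t = m - 1 := by
  intro cs
  induction cs with
  | nil => intro m i hm hd; simp [divCnt] at hd; omega
  | cons c rest ih =>
      intro m i hm hd
      rw [divCnt_cons] at hd
      simp only [scanA]
      by_cases hmod : PySem.Int.mod t c = 0
      · simp only [if_pos hmod]
        by_cases h1 : m - 1 = 0
        · refine ⟨0, by simp, ?_, by simpa, by simp [divCnt]; omega⟩
          rw [if_pos h1]; ring
        · rw [if_neg h1]
          have hd' : m - 1 ≤ divCnt rest t := by
            rw [if_pos hmod] at hd; omega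
          obtain ⟨jj, hj, e1, e2, e3⟩ := ih (m - 1) (i + 1) (by omega) hd'
          refine ⟨jj + 1, by simpa using Nat.succ_lt_succ hj, ?_, by simpa using e2, ?_⟩
          · rw [e1]; push_cast; ring
          · rw [List.take_succ_cons, divCnt_cons, if_pos hmod]; omega
      · simp only [if_neg hmod]
        rw [if_neg (show ¬ m = 0 by omega)]
        have hd' : m ≤ divCnt rest t := by
          rw [if_neg hmod] at hd; omega
        obtain ⟨jj, hj, e1, e2, e3⟩ := ih m (i + 1) hm hd'
        refine ⟨jj + 1, by simpa using Nat.succ_lt_succ hj, ?_, by simpa using e2, ?_⟩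
        · rw [e1]; push_cast; ring
        · rw [List.take_succ_cons, divCnt_cons, if_neg hmod]; omega

-- ===== B-side bracketing lemmas =====

theorem sum_map_ge_length (f : Int → Int) :
    ∀ (cs : List Int), (∀ c ∈ cs, 1 ≤ f c) → (cs.length : Int) ≤ (cs.map f).sum := by
  intro cs
  induction cs with
  | nil => simp
  | cons c rest ih =>
      intro h
      have h1 := h c (by simp)
      have h2 := ih (fun x hx => h x (by simp [hx]))
      simp only [List.map_cons, List.sum_cons, List.length_cons]
      push_cast
      omega

theorem fd_upper_scaled {t c sc : Int} (hc : 1 ≤ c) (hsc : 1 ≤ sc) (ht : 0 ≤ t) :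
    PySem.Int.floordiv t c * sc ≤ t * (PySem.Int.floordiv sc c + 1) := by
  have e1 := PySem.Int.floordiv_mul_add_mod t c
  have e2 := PySem.Int.floordiv_mul_add_mod sc c
  obtain ⟨m1, m2⟩ := mod_bounds t c (by omega)
  obtain ⟨m3, m4⟩ := mod_bounds sc c (by omega)
  have h3 : 0 ≤ PySem.Int.floordiv t c := by
    rw [PySem.Int.le_floordiv_iff_mul_le (by omega)]; omega
  have h4 : 0 ≤ PySem.Int.floordiv sc c := by
    rw [PySem.Int.le_floordiv_iff_mul_le (by omega)]; omega
  nlinarith [mul_nonneg h3 (show (0:Int) ≤ c - PySem.Int.mod sc c by omega),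
             mul_nonneg m1 (show (0:Int) ≤ PySem.Int.floordiv sc c + 1 by omega)]

theorem fd_lower_scaled {t c sc : Int} (hc : 1 ≤ c) (hsc : 1 ≤ sc) (ht : 0 ≤ t) :
    t * PySem.Int.floordiv sc c - sc ≤ PySem.Int.floordiv t c * sc := by
  have e1 := PySem.Int.floordiv_mul_add_mod t c
  have e2 := PySem.Int.floordiv_mul_add_mod sc c
  obtain ⟨m1, m2⟩ := mod_bounds t c (by omega)
  obtain ⟨m3, m4⟩ := mod_bounds sc c (by omega)
  have h3 : 0 ≤ PySem.Int.floordiv t c := by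
    rw [PySem.Int.le_floordiv_iff_mul_le (by omega)]; omega
  have h4 : 0 ≤ PySem.Int.floordiv sc c := by
    rw [PySem.Int.le_floordiv_iff_mul_le (by omega)]; omega
  nlinarith [mul_nonneg h3 (show (0:Int) ≤ PySem.Int.mod sc c by omega),
             mul_le_mul_of_nonneg_right (show PySem.Int.mod t c ≤ c - 1 by omega) h4]

theorem capF_upper_scaled (sc : Int) (hsc : 1 ≤ sc) :
    ∀ (cs : List Int), (∀ c ∈ cs, 1 ≤ c) → ∀ t : Int, 0 ≤ t →
      capF cs t * sc ≤ t * ((cs.map (fun c => PySem.Int.floordiv sc c)).sum + cs.length) := by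
  intro cs
  induction cs with
  | nil => intro _ t ht; simp [capF]
  | cons c rest ih =>
      intro h t ht
      have h1 := fd_upper_scaled (t := t) (sc := sc) (h c (by simp)) hsc ht
      have h2 := ih (fun x hx => h x (by simp [hx])) t ht
      rw [capF_cons]
      simp only [List.map_cons, List.sum_cons, List.length_cons]
      push_cast
      nlinarith [h1, h2]

theorem capF_lower_scaled (sc : Int) (hsc : 1 ≤ sc) :
    ∀ (cs : List Int), (∀ c ∈ cs, 1 ≤ c) → ∀ t : Int, 0 ≤ t →
      t * (cs.map (fun c => PySem.Int.floordiv sc c)).sum - cs.length * sc ≤ capF cs t * sc := by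
  intro cs
  induction cs with
  | nil => intro _ t ht; simp [capF]
  | cons c rest ih =>
      intro h t ht
      have h1 := fd_lower_scaled (t := t) (sc := sc) (h c (by simp)) hsc ht
      have h2 := ih (fun x hx => h x (by simp [hx])) t ht
      rw [capF_cons]
      simp only [List.map_cons, List.sum_cons, List.length_cons]
      push_cast
      nlinarith [h1, h2]

-- ===== B-side event counting =====

-- counting j ≤ q inside range(a, b)
theorem countP_pyRange_le (a b q : Int) (h1 : a - 1 ≤ q) (h2 : q ≤ b - 1) :
    (((PySem.List.pyRange a b 1).countP (fun j => decide (j ≤ q))) : Int) = q - a + 1 := by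
  rw [PySem.List.pyRange_one_append a (q + 1) b (by omega) (by omega), List.countP_append]
  have hall : (PySem.List.pyRange a (q + 1) 1).countP (fun j => decide (j ≤ q)) =
      (PySem.List.pyRange a (q + 1) 1).length := by
    apply List.countP_eq_length.mpr
    intro x hx
    rw [PySem.List.mem_pyRange_one] at hx
    simp; omega
  have hnone : (PySem.List.pyRange (q + 1) b 1).countP (fun j => decide (j ≤ q)) = 0 := by
    apply List.countP_eq_zero.mpr
    intro x hx
    rw [PySem.List.mem_pyRange_one] at hx
    simp; omega
  rw [hall, hnone, PySem.List.length_pyRange_one]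
  push_cast
  omega

-- the scalar key realizes the lexicographic order on (time, index) with 0 ≤ index < K
theorem key_lt_iff {K T R i iS : Int} (hK : 0 < K) (hi0 : 0 ≤ i) (hiK : i < K)
    (hiS0 : 0 ≤ iS) (hiSK : iS < K) :
    (T * K + i < R * K + iS) ↔ (T < R ∨ (T = R ∧ i < iS)) := by
  constructor
  · intro h
    rcases lt_trichotomy T R with h1 | h1 | h1
    · exact Or.inl h1
    · rw [h1] at h; exact Or.inr ⟨h1, by omega⟩
    · exfalso
      have := mul_le_mul_of_nonneg_right (show R + 1 ≤ T by omega) (le_of_lt hK)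
      nlinarith
  · intro h
    rcases h with h1 | ⟨h1, h2⟩
    · have := mul_le_mul_of_nonneg_right (show T + 1 ≤ R by omega) (le_of_lt hK)
      nlinarith
    · rw [h1]; omega

theorem key_inj {K t1 i1 t2 i2 : Int} (hK : 0 < K) (h1 : 0 ≤ i1) (h2 : i1 < K)
    (h3 : 0 ≤ i2) (h4 : i2 < K) (he : t1 * K + i1 = t2 * K + i2) :
    t1 = t2 ∧ i1 = i2 := by
  have n1 : ¬ (t1 * K + i1 < t2 * K + i2) := by omega
  have n2 : ¬ (t2 * K + i2 < t1 * K + i1) := by omega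
  rw [key_lt_iff hK h1 h2 h3 h4] at n1
  rw [key_lt_iff hK h3 h4 h1 h2] at n2
  have ht : t1 = t2 := by
    rcases lt_trichotomy t1 t2 with h | h | h
    · exact absurd (Or.inl h) n1
    · exact h
    · exact absurd (Or.inl h) n2
  refine ⟨ht, ?_⟩
  rw [ht] at he
  omega

-- count of window events of one core strictly below the key of (R, iS)
theorem block_count {c i K iS lo hi R : Int} (hc : 1 ≤ c) (hK : 0 < K)
    (hi0 : 0 ≤ i) (hiK : i < K) (hiS0 : 0 ≤ iS) (hiSK : iS < K)
    (hloR : lo ≤ R - 1) (hRhi : R ≤ hi) :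
    ((((PySem.List.pyRange (PySem.Int.floordiv lo c + 1) (PySem.Int.floordiv hi c + 1) 1).map
        (fun j => (c * j, i))).countP
        (fun x => decide (x.1 * K + x.2 < R * K + iS))) : Int)
      = PySem.Int.floordiv (R - 1) c - PySem.Int.floordiv lo c
        + (if i < iS ∧ PySem.Int.mod R c = 0 then 1 else 0) := by
  rw [List.countP_map]
  have hmono1 : PySem.Int.floordiv lo c ≤ PySem.Int.floordiv (R - 1) c :=
    floordiv_mono_num hc (by omega)
  have hmono2 : PySem.Int.floordiv (R - 1) c ≤ PySem.Int.floordiv hi c :=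
    floordiv_mono_num hc (by omega)
  by_cases hcase : i < iS ∧ PySem.Int.mod R c = 0
  · obtain ⟨hi1, hdvd⟩ := hcase
    have hfdR : PySem.Int.floordiv R c = PySem.Int.floordiv (R - 1) c + 1 := by
      have := fd_step (t := R) hc
      rw [if_pos hdvd] at this; omega
    have hcongr : ∀ j ∈ PySem.List.pyRange (PySem.Int.floordiv lo c + 1) (PySem.Int.floordiv hi c + 1) 1,
        ((fun x : Int × Int => decide (x.1 * K + x.2 < R * K + iS)) ∘ (fun j => (c * j, i))) j = true
          ↔ decide (j ≤ PySem.Int.floordiv R c) = true := by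
      intro j _
      simp only [Function.comp]
      have hiff : (c * j * K + i < R * K + iS) ↔ j ≤ PySem.Int.floordiv R c := by
        rw [key_lt_iff hK hi0 hiK hiS0 hiSK]
        have hle : j ≤ PySem.Int.floordiv R c ↔ j * c ≤ R :=
          PySem.Int.le_floordiv_iff_mul_le (by omega)
        constructor
        · rintro (h | ⟨h, _⟩)
          · rw [hle]; nlinarith
          · rw [hle]; nlinarith
        · intro h
          rw [hle] at h
          rcases lt_or_eq_of_le h with h' | h'
          · exact Or.inl (by nlinarith)
          · exact Or.inr ⟨by nlinarith, hi1⟩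
      simp [hiff]
    have hm3 : PySem.Int.floordiv lo c ≤ PySem.Int.floordiv R c :=
      floordiv_mono_num hc (by omega)
    have hm4 : PySem.Int.floordiv R c ≤ PySem.Int.floordiv hi c :=
      floordiv_mono_num hc hRhi
    rw [List.countP_congr hcongr,
        countP_pyRange_le _ _ (PySem.Int.floordiv R c) (by omega) (by omega)]
    rw [if_pos ⟨hi1, hdvd⟩]
    omega
  · have hcongr : ∀ j ∈ PySem.List.pyRange (PySem.Int.floordiv lo c + 1) (PySem.Int.floordiv hi c + 1) 1,
        ((fun x : Int × Int => decide (x.1 * K + x.2 < R * K + iS)) ∘ (fun j => (c * j, i))) j = true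
          ↔ decide (j ≤ PySem.Int.floordiv (R - 1) c) = true := by
      intro j _
      simp only [Function.comp]
      have hiff : (c * j * K + i < R * K + iS) ↔ j ≤ PySem.Int.floordiv (R - 1) c := by
        rw [key_lt_iff hK hi0 hiK hiS0 hiSK]
        have hle : j ≤ PySem.Int.floordiv (R - 1) c ↔ j * c ≤ R - 1 :=
          PySem.Int.le_floordiv_iff_mul_le (by omega)
        constructor
        · rintro (h | ⟨h, h2⟩)
          · rw [hle]; nlinarith
          · exfalso
            apply hcase
            refine ⟨h2, ?_⟩
            rw [PySem.Int.mod_eq_zero_iff_dvd]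
            exact ⟨j, by linarith [h]⟩
        · intro h
          rw [hle] at h
          exact Or.inl (by nlinarith)
      simp [hiff]
    rw [List.countP_congr hcongr,
        countP_pyRange_le _ _ (PySem.Int.floordiv (R - 1) c) (by omega) (by omega)]
    rw [if_neg hcase]
    omega

-- total count over all cores: capacity difference plus earlier divisors of R
theorem count_E {K iS lo hi R : Int} (hK : 0 < K) (hiS0 : 0 ≤ iS) (hiSK : iS < K)
    (hloR : lo ≤ R - 1) (hRhi : R ≤ hi) :
    ∀ (cs : List Int) (i0 : Int), (∀ c ∈ cs, 1 ≤ c) → 0 ≤ i0 → i0 + (cs.length : Int) ≤ K →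
      (((PySem.List.enumerate cs i0).flatMap
          (fun p => (PySem.List.pyRange (PySem.Int.floordiv lo p.2 + 1) (PySem.Int.floordiv hi p.2 + 1) 1).map
            (fun j => (p.2 * j, p.1)))).countP
          (fun x => decide (x.1 * K + x.2 < R * K + iS)) : Int)
      = (capF cs (R - 1) - capF cs lo) + divCnt (cs.take (iS - i0).toNat) R := by
  intro cs
  induction cs with
  | nil => intro i0 _ _ _; simp [PySem.List.enumerate_nil, capF, divCnt]
  | cons c rest ih =>
      intro i0 hc hi0 hiK
      rw [PySem.List.enumerate_cons, List.flatMap_cons, List.countP_append]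
      have hlen : (0:Int) ≤ (rest.length : Int) := by positivity
      have hblock := block_count (c := c) (i := i0) (K := K) (iS := iS) (lo := lo) (hi := hi)
        (R := R) (hc c (by simp)) hK hi0
        (by simp only [List.length_cons] at hiK; push_cast at hiK ⊢; omega) hiS0 hiSK hloR hRhi
      have hrest := ih (i0 + 1) (fun x hx => hc x (by simp [hx])) (by omega)
        (by simp only [List.length_cons] at hiK; push_cast at hiK ⊢; omega)
      rw [capF_cons, capF_cons]
      have htake : divCnt ((c :: rest).take (iS - i0).toNat) R
          = (if i0 < iS ∧ PySem.Int.mod R c = 0 then 1 else 0)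
            + divCnt (rest.take (iS - (i0 + 1)).toNat) R := by
        by_cases hlt : i0 < iS
        · have hnat : (iS - i0).toNat = (iS - (i0 + 1)).toNat + 1 := by omega
          rw [hnat, List.take_succ_cons, divCnt_cons]
          by_cases hm : PySem.Int.mod R c = 0
          · rw [if_pos hm, if_pos ⟨hlt, hm⟩]
          · rw [if_neg hm, if_neg (by tauto)]
        · have hnat1 : (iS - i0).toNat = 0 := by omega
          have hnat2 : (iS - (i0 + 1)).toNat = 0 := by omega
          rw [hnat1, hnat2]
          simp [divCnt, if_neg (by tauto : ¬ (i0 < iS ∧ PySem.Int.mod R c = 0))]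
      push_cast
      push_cast at hblock hrest
      rw [htake]
      omega

-- every event's index is in [0, len)
theorem eventsB_snd_bounds (cores : List Int) (lo hi : Int) :
    ∀ x ∈ eventsB cores lo hi, 0 ≤ x.2 ∧ x.2 < (cores.length : Int) := by
  intro x hx
  unfold eventsB at hx
  rw [List.mem_flatMap] at hx
  obtain ⟨p, hp, hx⟩ := hx
  rw [List.mem_map] at hx
  obtain ⟨j, _, rfl⟩ := hx
  rw [PySem.List.mem_enumerate_iff] at hp
  obtain ⟨kk, hk, rfl⟩ := hp
  simp
  omega

-- the answering event is in the window list
theorem mem_eventsB (cores : List Int) (lo hi R : Int) (jj : Nat) (hj : jj < cores.length)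
    (hc1 : 1 ≤ cores[jj]) (hmod : PySem.Int.mod R cores[jj] = 0)
    (hlt : lo < R) (hhi : R ≤ hi) :
    ((R, (jj : Int)) ∈ eventsB cores lo hi) := by
  unfold eventsB
  rw [List.mem_flatMap]
  refine ⟨((jj : Int), cores[jj]), ?_, ?_⟩
  · rw [PySem.List.mem_enumerate_iff]
    exact ⟨jj, hj, by simp⟩
  · rw [List.mem_map]
    have hdd : PySem.Int.floordiv R cores[jj] * cores[jj] = R := by
      have := PySem.Int.floordiv_mul_add_mod R cores[jj]
      omega
    refine ⟨PySem.Int.floordiv R cores[jj], ?_, ?_⟩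
    · rw [PySem.List.mem_pyRange_one]
      constructor
      · show PySem.Int.floordiv lo cores[jj] + 1 ≤ PySem.Int.floordiv R cores[jj]
        have hlolo : PySem.Int.floordiv lo cores[jj] * cores[jj] ≤ lo :=
          fd_mul_le lo cores[jj] (by omega)
        by_contra hcon
        have hle : PySem.Int.floordiv R cores[jj] ≤ PySem.Int.floordiv lo cores[jj] := by omega
        have := mul_le_mul_of_nonneg_right hle (show (0:Int) ≤ cores[jj] by omega)
        nlinarith
      · show PySem.Int.floordiv R cores[jj] < PySem.Int.floordiv hi cores[jj] + 1
        have := floordiv_mono_num (s := R) (t := hi) hc1 hhi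
        omega
    · have : cores[jj] * PySem.Int.floordiv R cores[jj] = R := by linarith [hdd]
      simp [this]

-- position r in a key-sorted list = the element with r strictly-smaller keys (up to key equality)
theorem nth_count {α : Type} (key : α → Int) :
    ∀ (l : List α) (r : Nat) (e : α),
      l.Pairwise (fun a b => key a ≤ key b) → e ∈ l →
      l.countP (fun x => decide (key x < key e)) = r →
      ∃ e', l[r]? = some e' ∧ key e' = key e := by
  intro l
  induction l with
  | nil => intro r e _ he; cases he
  | cons h tl ih =>
      intro r e hpw he hc
      rw [List.countP_cons] at hc
      obtain ⟨hhd, htl⟩ := List.pairwise_cons.mp hpw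
      by_cases hlt : key h < key e
      · have he' : e ∈ tl := by
          rcases List.mem_cons.mp he with rfl | h' 
          · exact absurd hlt (lt_irrefl _)
          · exact h'
      -- head counts once
        have hcc : tl.countP (fun x => decide (key x < key e)) + 1 = r := by
          simpa [hlt] using hc
        cases r with
        | zero => omega
        | succ r' =>
            obtain ⟨e', he1, he2⟩ := ih r' e htl he' (by omega)
            exact ⟨e', by simpa using he1, he2⟩
      · -- key e ≤ key h, so key e = key h and nothing counts
        have hke : key e = key h := by
          rcases List.mem_cons.mp he with rfl | h'
          · rfl
          · exact le_antisymm (not_lt.mp hlt) (hhd e h')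
        have hz : tl.countP (fun x => decide (key x < key e)) = 0 := by
          apply List.countP_eq_zero.mpr
          intro x hx
          have h2 := hhd x hx
          simp only [decide_eq_true_eq]
          intro h3
          rw [hke] at h3
          exact absurd h3 (not_lt.mpr h2)
        have hcc : tl.countP (fun x => decide (key x < key e)) = r := by
          simpa [hlt] using hc
        rw [hz] at hcc
        exact ⟨h, by simp [← hcc], hke.symm⟩

-- ===== VERDICT (by name: the statement is the Claim_ definition above) =====
theorem solution_spec : Claim_equal_solution := by
  intro n cores hdom hpre
  unfold Spec_solution solution solution_alt
  by_cases hn : n ≤ (cores.length : Int)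
  · rw [if_pos hn, if_pos hn]
  · rw [if_neg hn, if_neg hn]
    obtain ⟨hne, hc⟩ : cores ≠ [] ∧ ∀ c ∈ cores, 1 ≤ c := by
      rcases hpre with h | h
      · exact absurd h hn
      · exact h
    simp only []
    have hdomc : ∀ c ∈ cores, c ≤ 2147483648 := by
      intro c hcm
      unfold Dom_solution at hdom
      simp only [Bool.and_eq_true, List.all_eq_true] at hdom
      have h1 := hdom.2 c hcm
      simp [pvDomInt] at h1
      exact h1.2
    have hK : (0:Int) < (cores.length : Int) := by
      have : 0 < cores.length := List.length_pos_iff.mpr hne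
      exact_mod_cast this
    set m := n - (cores.length : Int) with hmdef
    have hm : 1 ≤ m := by omega
    set S := (cores.map (fun c => PySem.Int.floordiv (2 ^ 64) c)).sum with hSdef
    set lo := PySem.Int.floordiv (m * 2 ^ 64 - 1) (S + (cores.length : Int)) with hlodef
    set hi := PySem.Int.floordiv ((m + (cores.length : Int)) * 2 ^ 64 + S - 1) S with hhidef
    have hS1 : ∀ c ∈ cores, 1 ≤ PySem.Int.floordiv (2 ^ 64) c := by
      intro c hcm
      rw [PySem.Int.le_floordiv_iff_mul_le (by have := hc c hcm; omega)]
      have := hdomc c hcm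
      omega
    have hSK : (cores.length : Int) ≤ S := hSdef ▸ sum_map_ge_length _ cores hS1
    have hlo0 : 0 ≤ lo := by
      rw [hlodef, PySem.Int.le_floordiv_iff_mul_le (by omega)]
      nlinarith
    have hloB : lo * (S + (cores.length : Int)) ≤ m * 2 ^ 64 - 1 := by
      rw [hlodef]; exact fd_mul_le _ _ (by omega)
    have hcaplo : capF cores lo < m := by
      have h1 := capF_upper_scaled (2 ^ 64) (by norm_num) cores hc lo hlo0
      rw [← hSdef] at h1
      by_contra hcon
      push_neg at hcon
      have h2 := mul_le_mul_of_nonneg_right hcon (show (0:Int) ≤ 2 ^ 64 by norm_num)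
      nlinarith
    have hhi0 : 0 ≤ hi := by
      rw [hhidef, PySem.Int.le_floordiv_iff_mul_le (by omega)]
      nlinarith
    have hhiB : (m + (cores.length : Int)) * 2 ^ 64 ≤ hi * S := by
      have h1 := PySem.Int.floordiv_mul_add_mod ((m + (cores.length : Int)) * 2 ^ 64 + S - 1) S
      obtain ⟨h2, h3⟩ := mod_bounds ((m + (cores.length : Int)) * 2 ^ 64 + S - 1) S (by omega)
      rw [← hhidef] at h1
      omega
    have hcaphi : m ≤ capF cores hi := by
      have h1 := capF_lower_scaled (2 ^ 64) (by norm_num) cores hc hi hhi0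
      rw [← hSdef] at h1
      by_contra hcon
      push_neg at hcon
      have h2 : capF cores hi ≤ m - 1 := by omega
      have h3 := mul_le_mul_of_nonneg_right h2 (show (0:Int) ≤ 2 ^ 64 by norm_num)
      nlinarith
    -- A's side: R = minimal instant with capF ≥ m
    cases hmx : PySem.List.max? cores (fun x => x) with
    | none => exact absurd ((PySem.List.max?_eq_none_iff cores _).mp hmx) hne
    | some M0 =>
        have hM := PySem.List.max?_isMax hmx
        have hM1 : (1:Int) ≤ M0 := hc M0 (PySem.List.max?_mem hmx)
        simp only [Option.getD_some]
        have hMm : 1 ≤ M0 * m := by nlinarith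
        have hbs := bsLoop_correct cores hc m 1 (M0 * m) hMm
          (capF_start cores hne hc hm hM)
          (fun t ht => lt_of_le_of_lt (capF_nonpos cores hc (by omega)) (by omega))
        set R := bsLoop cores m 1 (M0 * m) with hRdef
        obtain ⟨hR1, hR2, hRcap, hRmin⟩ := hbs
        rw [foldl_sub_eq]
        have hm2R : 1 ≤ m - capF cores (R - 1) := by
          have := hRmin (R - 1) (by omega); omega
        have hdiv : m - capF cores (R - 1) ≤ divCnt cores R := by
          have := capF_step cores hc R; omega
        obtain ⟨jj, hj, hscan, hmodjj, htakejj⟩ :=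
          scanA_char R cores (m - capF cores (R - 1)) 0 hm2R hdiv
        rw [hscan]
        -- window facts
        have hloR : lo < R := by
          by_contra hcon
          push_neg at hcon
          have := capF_mono cores hc hcon
          omega
        have hRhi : R ≤ hi := by
          by_contra hcon
          push_neg at hcon
          have := hRmin hi hcon
          omega
        rw [← capF_eq_sum cores lo]
        have hm2lo : 1 ≤ m - capF cores lo := by
          have := capF_mono cores hc (show lo ≤ R - 1 by omega)
          omega
        -- count events strictly below the key of (R, jj)
        have hjc1 : 1 ≤ cores[jj] := hc _ (List.getElem_mem hj)
        have hmemE : (R, (jj : Int)) ∈ eventsB cores lo hi :=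
          mem_eventsB cores lo hi R jj hj hjc1 hmodjj hloR hRhi
        have hmemS : (R, (jj : Int)) ∈
            PySem.List.sorted (eventsB cores lo hi)
              (fun p => p.1 * (cores.length : Int) + p.2) false :=
          (PySem.List.mem_sorted _ _ _ _).mpr hmemE
        have hcountE := count_E (K := (cores.length : Int)) (iS := (jj : Int)) (lo := lo)
          (hi := hi) (R := R) hK (by positivity) (by exact_mod_cast hj) (by omega) hRhi
          cores 0 hc (le_refl 0) (by omega)
        have hnat0 : (((jj : Int) - 0).toNat) = jj := by omega
        rw [hnat0, htakejj] at hcountE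
        have hcount : ((PySem.List.sorted (eventsB cores lo hi)
            (fun p => p.1 * (cores.length : Int) + p.2) false).countP
            (fun x => decide (x.1 * (cores.length : Int) + x.2
              < R * (cores.length : Int) + (jj : Int))) : Int) = m - capF cores lo - 1 := by
          rw [List.Perm.countP_eq _
            (PySem.List.sorted_perm (eventsB cores lo hi)
              (fun p => p.1 * (cores.length : Int) + p.2) false)]
          unfold eventsB
          rw [hcountE]
          omega
        have hr : (PySem.List.sorted (eventsB cores lo hi)
            (fun p => p.1 * (cores.length : Int) + p.2) false).countP
            (fun x => decide (x.1 * (cores.length : Int) + x.2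
              < R * (cores.length : Int) + (jj : Int))) = (m - capF cores lo - 1).toNat := by
          omega
        obtain ⟨e', he1, he2⟩ := nth_count
          (fun p : Int × Int => p.1 * (cores.length : Int) + p.2)
          (PySem.List.sorted (eventsB cores lo hi)
            (fun p => p.1 * (cores.length : Int) + p.2) false)
          (m - capF cores lo - 1).toNat (R, (jj : Int))
          (PySem.List.sorted_pairwise _ _) hmemS hr
        have he'E : e' ∈ eventsB cores lo hi :=
          (PySem.List.mem_sorted _ _ _ _).mp (List.mem_of_getElem? he1)
        obtain ⟨hb1, hb2⟩ := eventsB_snd_bounds cores lo hi e' he'E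
        have he'eq : e' = (R, (jj : Int)) := by
          have hinj := key_inj (K := (cores.length : Int)) hK hb1 hb2
            (show (0:Int) ≤ (jj : Int) by positivity)
            (show ((jj : Int)) < (cores.length : Int) by exact_mod_cast hj) he2
          obtain ⟨hx, hy⟩ := hinj
          exact Prod.ext hx hy
        have hpg : PySem.List.pyGet? (PySem.List.sorted (eventsB cores lo hi)
            (fun p => p.1 * (cores.length : Int) + p.2) false) (m - capF cores lo - 1)
            = some (R, (jj : Int)) := by
          have hidx : m - capF cores lo - 1 = ((m - capF cores lo - 1).toNat : Int) := by
            omega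
          rw [hidx, PySem.List.pyGet?_natCast]
          rw [he1, he'eq]
        simp only [hpg]
        omega
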